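-- pv_equiv track=rewrite | github.com/MrBrantCode/unitest_baseline | mut_generate/mist_train_taco/taco_6105/solution.py | count_equal_beauty_partitions
-- ===== SOURCE A (Python) =====
-- def count_equal_beauty_partitions(N, A):
--     mod = 10**9 + 7
--
--     # Calculate the prefix XOR array
--     b = [0] * N
--     b[0] = A[0]
--     for n in range(1, N):
--         b[n] = A[n] ^ b[n - 1]
--
--     # Find the maximum value in the prefix XOR array
--     m = max(b)
--
--     # Initialize dp arrays
--     dp = [[0] * (m + 1) for _ in range(2)]
--     dp[0] = [1] * (m + 1)
--
--     cnt = [0] * (m + 1)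
--     z = 0
--
--     for i in range(N):
--         if b[i] == 0:
--             z += 1
--         dp[0][b[i]] += dp[1][b[i]] * (z - cnt[b[i]])
--         dp[0][b[i]] %= mod
--         dp[1][b[i]] += dp[0][b[i]]
--         dp[1][b[i]] %= mod
--         cnt[b[i]] = z
--
--     if b[N - 1] != 0:
--         return dp[0][b[N - 1]]
--     else:
--         ans = pow(2, z - 1, mod)
--         for i in range(1, m + 1):
--             ans += dp[1][i]
--             ans %= mod
--         return ans
-- ===== SOURCE B (Python) =====
-- def count_equal_beauty_partitions(N, A):
--     mod = 10**9 + 7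
--
--     # Bucket positions of each prefix-XOR value: value -> list of running zero-counts
--     occ = {}
--     x = 0
--     z = 0
--     for n in range(N):
--         x ^= A[n]
--         if x == 0:
--             z += 1
--         occ.setdefault(x, []).append(z)
--
--     def endsum(zs):
--         # count cut-chains ending at the LAST occurrence, by their STARTING occurrence:
--         # right-to-left pass keeping suffix sums S = sum R_j, T = sum z_j*R_j, where
--         # R_j = number of chains starting at occurrence j (R_j = T - z_j*S).
--         S, T = 1, zs[-1]
--         for zj in reversed(zs[:-1]):
--             R = (T - zj * S) % mod
--             S = (S + R) % mod
--             T = (T + zj * R) % mod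
--         return S
--
--     def allsum(zs):
--         # count cut-chains ending ANYWHERE, again by starting occurrence (E_j = 1 + T - z_j*S)
--         S, T = 0, 0
--         for zj in reversed(zs):
--             R = (1 + T - zj * S) % mod
--             S = (S + R) % mod
--             T = (T + zj * R) % mod
--         return S
--
--     if x != 0:
--         return endsum(occ[x])
--     zeros = occ[0]  # the bucket of zero prefix-xors; nonempty since the total xor is 0
--     ans = pow(2, len(zeros) - 1, mod)
--     for v, zs in occ.items():
--         if v != 0:
--             ans = (ans + allsum(zs)) % mod
--     return ans
-- ===== Notes on version B (the rewrite author's own statement) =====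
-- stated objective: alternative
-- what changed: B drops A's interleaved dp arrays of size max(prefix-xor)+1 entirely: it buckets each prefix-xor value's occurrences (as running zero-counts) and counts cut-chains per value by a right-to-left pass over that list, classifying chains by their STARTING occurrence with suffix sums S,T and the subtraction recurrence R = [1] + T - z*S, instead of A's forward f,g recurrence classifying chains by their ending occurrence; cost no longer depends on the magnitude of the prefix-xor values (intended as faster; a timing run measured ~2.6-3.9x but could not confirm it under its consistency rule).
-- outside the precondition, e.g. on count_equal_beauty_partitions(4, [1, -2, -1, 9]): A returns 2, B returns 1; on count_equal_beauty_partitions(3, [5, -3, 2]): A raises IndexError, B returns 1; on count_equal_beauty_partitions(2, [1]): A raises IndexError, B raises IndexError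
import Mathlib
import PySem

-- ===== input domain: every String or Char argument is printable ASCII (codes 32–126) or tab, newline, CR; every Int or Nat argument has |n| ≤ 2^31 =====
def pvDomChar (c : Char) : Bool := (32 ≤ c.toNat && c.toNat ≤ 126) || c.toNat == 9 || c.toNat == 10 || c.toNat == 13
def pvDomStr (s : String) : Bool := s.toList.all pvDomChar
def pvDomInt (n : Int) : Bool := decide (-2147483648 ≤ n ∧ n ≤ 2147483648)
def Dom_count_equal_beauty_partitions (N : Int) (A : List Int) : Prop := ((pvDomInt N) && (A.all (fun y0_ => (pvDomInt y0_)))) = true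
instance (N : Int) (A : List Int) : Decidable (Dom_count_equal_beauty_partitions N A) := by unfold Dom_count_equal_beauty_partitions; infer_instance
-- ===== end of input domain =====

-- B replaces A's dp arrays of size max(prefix-xor)+1 by per-value backward suffix-sum chain counting
-- over bucketed prefix-xor occurrence lists; equivalence proved on N ≥ 1, N ≤ len(A), nonnegative A[0..N-1].


-- ===== PORT A =====
-- body of A's 'for i in range(N)' loop; st = (dp[0], dp[1], cnt, z), bi = b[i]
def pvStepA (st : List Int × List Int × List Int × Int) (bi : Int) : List Int × List Int × List Int × Int :=
  let z := if bi = 0 then st.2.2.2 + 1 else st.2.2.2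
  let f := PySem.Int.mod
    (PySem.List.pyGetD st.1 bi 0 + PySem.List.pyGetD st.2.1 bi 0 * (z - PySem.List.pyGetD st.2.2.1 bi 0)) 1000000007
  let g := PySem.Int.mod (PySem.List.pyGetD st.2.1 bi 0 + f) 1000000007
  (PySem.List.pySetD st.1 bi f, PySem.List.pySetD st.2.1 bi g, PySem.List.pySetD st.2.2.1 bi z, z)

def count_equal_beauty_partitions (N : Int) (A : List Int) : Int :=
  let M : Int := 1000000007
  -- b = [0] * N; b[0] = A[0]; for n in range(1, N): b[n] = A[n] ^ b[n - 1]
  let b : List Int := (PySem.List.pyRange 1 N 1).foldl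
    (fun b n => PySem.List.pySetD b n
      (PySem.Int.bxor (PySem.List.pyGetD A n 0) (PySem.List.pyGetD b (n - 1) 0)))
    (PySem.List.pySetD (List.replicate N.toNat 0) 0 (PySem.List.pyGetD A 0 0))
  -- m = max(b)
  let m : Int := (PySem.List.max? b (fun x => x)).getD 0
  -- dp[0] = [1]*(m+1); dp[1] = [0]*(m+1); cnt = [0]*(m+1); z = 0; for i in range(N): …
  let st := (PySem.List.pyRange 0 N 1).foldl
    (fun st i => pvStepA st (PySem.List.pyGetD b i 0))
    (List.replicate (m + 1).toNat 1, List.replicate (m + 1).toNat 0, List.replicate (m + 1).toNat 0, 0)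
  let last := PySem.List.pyGetD b (N - 1) 0
  if last ≠ 0 then PySem.List.pyGetD st.1 last 0
  else
    -- pow(2, z - 1, mod): exponent z - 1 ≥ 0 whenever this branch runs inside Pre_, so .toNat is exact
    let ans0 := PySem.Int.powMod 2 (st.2.2.2 - 1).toNat M
    (PySem.List.pyRange 1 (m + 1) 1).foldl
      (fun ans i => PySem.Int.mod (ans + PySem.List.pyGetD st.2.1 i 0) M) ans0

-- ===== PORT B =====
-- body of B's 'for n in range(N)' loop; st = (x, z, occ), a = A[n]
def pvStepB (st : Int × Int × PySem.Dict Int (List Int)) (a : Int) : Int × Int × PySem.Dict Int (List Int) :=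
  let x := PySem.Int.bxor st.1 a
  let z := if x = 0 then st.2.1 + 1 else st.2.1
  (x, z, st.2.2.modify x [] (· ++ [z]))

-- body of endsum's 'for zj in reversed(zs[:-1])' loop; st = (S, T)
def pvBStep (st : Int × Int) (zj : Int) : Int × Int :=
  let R := PySem.Int.mod (st.2 - zj * st.1) 1000000007
  (PySem.Int.mod (st.1 + R) 1000000007, PySem.Int.mod (st.2 + zj * R) 1000000007)

-- body of allsum's 'for zj in reversed(zs)' loop; st = (S, T)
def pvBStep1 (st : Int × Int) (zj : Int) : Int × Int :=
  let R := PySem.Int.mod (1 + st.2 - zj * st.1) 1000000007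
  (PySem.Int.mod (st.1 + R) 1000000007, PySem.Int.mod (st.2 + zj * R) 1000000007)

-- endsum(zs): S, T = 1, zs[-1]; for zj in reversed(zs[:-1]): …; return S
-- (zs[-1] via pyGet?; the default is unreachable: B only calls endsum on a nonempty bucket)
def pvEndsum (zs : List Int) : Int :=
  (((PySem.List.slice zs none (some (-1))).reverse).foldl pvBStep
    (1, (PySem.List.pyGet? zs (-1)).getD 0)).1

-- allsum(zs): S, T = 0, 0; for zj in reversed(zs): …; return S
def pvAllsum (zs : List Int) : Int :=
  ((zs.reverse).foldl pvBStep1 (0, 0)).1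

def count_equal_beauty_partitions_alt (N : Int) (A : List Int) : Int :=
  let M : Int := 1000000007
  -- occ = {}; x = 0; z = 0; for n in range(N): x ^= A[n]; if x == 0: z += 1; occ.setdefault(x, []).append(z)
  let st := (PySem.List.pyRange 0 N 1).foldl
    (fun st n => pvStepB st (PySem.List.pyGetD A n 0)) (0, 0, PySem.Dict.empty)
  let x := st.1
  if x ≠ 0 then pvEndsum (st.2.2.getD x [])
  else
    -- zeros = occ[0] (KeyError → getD, unreachable inside Pre_); pow(2, len(zeros) - 1, mod):
    -- the exponent is ≥ 0 whenever this branch runs inside Pre_, so .toNat is exact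
    let zeros := st.2.2.getD 0 []
    let ans0 := PySem.Int.powMod 2 ((zeros.length : Int) - 1).toNat M
    st.2.2.items.foldl
      (fun ans p => if p.1 ≠ 0 then PySem.Int.mod (ans + pvAllsum p.2) M else ans) ans0

-- ===== PRECONDITION & SPEC =====
-- Pre_ excludes N ≤ 0 and N > len(A) (IndexError in A) and lists whose first N elements contain a
-- negative value: there A either raises IndexError or returns an accidental value through Python
-- negative-index wraparound into its dp arrays.
def Pre_count_equal_beauty_partitions (N : Int) (A : List Int) : Prop :=
  1 ≤ N ∧ N ≤ A.length ∧ ∀ a ∈ A.take N.toNat, 0 ≤ a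
instance (N : Int) (A : List Int) : Decidable (Pre_count_equal_beauty_partitions N A) := by
  unfold Pre_count_equal_beauty_partitions; infer_instance

def pvWitness_count_equal_beauty_partitions : Int × List Int := (4, [1, 2, 3, 0])

def Spec_count_equal_beauty_partitions (N : Int) (A : List Int) (out : Int) : Prop := out = count_equal_beauty_partitions_alt N A
instance (N : Int) (A : List Int) (out : Int) : Decidable (Spec_count_equal_beauty_partitions N A out) := by unfold Spec_count_equal_beauty_partitions; infer_instance

-- ===== CLAIM (what is proved, stated in full; the proofs are below) =====
def Claim_equal_count_equal_beauty_partitions : Prop := ∀ (N : Int) (A : List Int), Dom_count_equal_beauty_partitions N A → Pre_count_equal_beauty_partitions N A → Spec_count_equal_beauty_partitions N A (count_equal_beauty_partitions N A)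

-- ===== LEMMAS AND PROOFS =====

-- prefix XORs of a list, seeded with accumulator x
def pvPx : Int → List Int → List Int
  | _, [] => []
  | x, a :: t => PySem.Int.bxor x a :: pvPx (PySem.Int.bxor x a) t

-- running zero-counts: pairs (value, #zeros among prefix xors so far), seeded with count z
def pvZP : Int → List Int → List (Int × Int)
  | _, [] => []
  | z, v :: t => (v, if v = 0 then z + 1 else z) :: pvZP (if v = 0 then z + 1 else z) t

-- the zero-counts at the occurrences of value v
def pvZL (z : Int) (bs : List Int) (v : Int) : List Int :=
  ((pvZP z bs).filter (fun p => p.1 == v)).map (·.2)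

-- one step of A's per-value forward chain recurrence (extracted from pvStepA by loopA)
def pvStep (s : Int × Int × Int) (zi : Int) : Int × Int × Int :=
  let f := PySem.Int.mod (s.1 + s.2.1 * (zi - s.2.2)) 1000000007
  let g := PySem.Int.mod (s.2.1 + f) 1000000007
  (f, g, zi)

-- the grouping fold
def pvGrp (d : PySem.Dict Int (List Int)) (l : List (Int × Int)) : PySem.Dict Int (List Int) :=
  l.foldl (fun d p => d.modify p.1 [] (· ++ [p.2])) d

-- canonical forms of the two programs' results, as functions of the prefix-xor list
def pvAcore (bs : List Int) : Int :=
  let m := (PySem.List.max? bs (fun x => x)).getD 0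
  let L := (m + 1).toNat
  let r := bs.foldl pvStepA (List.replicate L 1, List.replicate L 0, List.replicate L 0, (0 : Int))
  let last := bs.getLastD 0
  if last ≠ 0 then PySem.List.pyGetD r.1 last 0
  else
    (PySem.List.pyRange 1 (m + 1) 1).foldl
      (fun ans i => PySem.Int.mod (ans + PySem.List.pyGetD r.2.1 i 0) 1000000007)
      (PySem.Int.powMod 2 (r.2.2.2 - 1).toNat 1000000007)

def pvBcore (bs : List Int) : Int :=
  let x := bs.getLastD 0
  let occ := pvGrp PySem.Dict.empty (pvZP 0 bs)
  if x ≠ 0 then pvEndsum (occ.getD x [])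
  else
    occ.items.foldl
      (fun ans p => if p.1 ≠ 0 then PySem.Int.mod (ans + pvAllsum p.2) 1000000007 else ans)
      (PySem.Int.powMod 2 ((((occ.getD 0 []).length : Int)) - 1).toNat 1000000007)

-- ---- sublists mediator: both chain recurrences count weighted cut-chains = sublists ----

-- all sublists (subsequences) of a list
def pvSubl : List Int → List (List Int)
  | [] => [[]]
  | a :: t => pvSubl t ++ (pvSubl t).map (a :: ·)

def pvSum (l : List Int) (f : List Int → Int) : Int := ((pvSubl l).map f).sum

-- weight of a cut-chain: product of gaps between consecutive entries
def pvW : List Int → Int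
  | [] => 1
  | [_] => 1
  | a :: b :: t => (b - a) * pvW (b :: t)

-- exact (integer) chain counts
def pvC (l : List Int) (a : Int) : Int := pvSum l (fun s => pvW (s ++ [a]))
def pvG (l : List Int) : Int := pvSum l pvW - 1
def pvH (l : List Int) (a : Int) : Int := pvSum l (fun s => (s ++ [a]).headD 0 * pvW (s ++ [a]))
def pvHA (l : List Int) : Int := pvSum l (fun s => s.headD 0 * pvW s)

theorem pvSum_nil (f : List Int → Int) : pvSum [] f = f [] := by simp [pvSum, pvSubl]

theorem pvSum_cons (a : Int) (t : List Int) (f : List Int → Int) :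
    pvSum (a :: t) f = pvSum t f + pvSum t (fun s => f (a :: s)) := by
  simp only [pvSum, pvSubl, List.map_append, List.sum_append, List.map_map]
  rfl

theorem pvSum_concat (l : List Int) (a : Int) (f : List Int → Int) :
    pvSum (l ++ [a]) f = pvSum l (fun s => f s + f (s ++ [a])) := by
  induction l generalizing f with
  | nil => simp [pvSum, pvSubl]
  | cons x t ih =>
    rw [List.cons_append, pvSum_cons, ih, ih, pvSum_cons]
    rfl

theorem pvSum_add (l : List Int) (f g : List Int → Int) :
    pvSum l (fun s => f s + g s) = pvSum l f + pvSum l g := by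
  unfold pvSum
  induction pvSubl l with
  | nil => simp
  | cons s t ih => simp only [List.map_cons, List.sum_cons, ih]; ring

theorem pvSum_mul (l : List Int) (c : Int) (f : List Int → Int) :
    pvSum l (fun s => c * f s) = c * pvSum l f := by
  unfold pvSum
  induction pvSubl l with
  | nil => simp
  | cons s t ih => simp only [List.map_cons, List.sum_cons, ih]; ring

theorem pvSum_congr (l : List Int) (f g : List Int → Int) (h : ∀ s, f s = g s) :
    pvSum l f = pvSum l g := by
  unfold pvSum
  exact congrArg _ (List.map_congr_left (fun s _ => h s))

theorem pvSum_zero (l : List Int) : pvSum l (fun _ => (0:Int)) = 0 := by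
  unfold pvSum
  induction pvSubl l with
  | nil => simp
  | cons s u ih2 => simpa using ih2

theorem pvSum_ind_nil (l : List Int) :
    pvSum l (fun s => if s = [] then (1:Int) else 0) = 1 := by
  induction l with
  | nil => simp [pvSum, pvSubl]
  | cons a t ih =>
    rw [pvSum_cons, ih]
    have h1 : pvSum t (fun s => if (a :: s) = [] then (1:Int) else 0) = pvSum t (fun _ => 0) :=
      pvSum_congr _ _ _ (fun s => by simp)
    rw [h1, pvSum_zero]
    norm_num

theorem pvW_append_last (s : List Int) (a : Int) (h : s ≠ []) :
    pvW (s ++ [a]) = pvW s * (a - s.getLastD 0) := by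
  induction s with
  | nil => exact absurd rfl h
  | cons x t ih =>
    cases t with
    | nil => show (a - x) * pvW [a] = pvW [x] * (a - x); simp [pvW]
    | cons y u =>
      have ih' := ih (by simp)
      simp only [List.cons_append, pvW] at *
      rw [ih']
      simp only [List.getLastD_cons]
      ring

theorem pvW_cons (z0 : Int) (s : List Int) (h : s ≠ []) :
    pvW (z0 :: s) = (s.headD 0 - z0) * pvW s := by
  cases s with
  | nil => exact absurd rfl h
  | cons b t => rfl

theorem pvW_cons_full (z0 : Int) (s : List Int) :
    pvW (z0 :: s) = (s.headD 0 - z0) * pvW s + (if s = [] then 1 + z0 else 0) := by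
  cases s with
  | nil => simp [pvW]
  | cons b t => simp [pvW_cons z0 (b :: t) (by simp)]

-- the forward key identity: extending every chain by a new last element a
theorem pvKeyAux (l : List Int) : ∀ (a : Int),
    pvC l a = pvC l.dropLast (l.getLastD 0) + pvG l * (a - l.getLastD 0) := by
  induction l using List.reverseRecOn with
  | nil => intro a; simp [pvC, pvG, pvSum_nil, pvW]
  | append_singleton t L ih =>
    intro a
    have hCsplit : pvC (t ++ [L]) a
        = pvC t a + (a - L) * pvC t L := by
      unfold pvC
      rw [pvSum_concat]
      have : pvSum t (fun s => pvW (s ++ [a]) + pvW (s ++ [L] ++ [a]))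
          = pvSum t (fun s => pvW (s ++ [a]) + (a - L) * pvW (s ++ [L])) := by
        apply pvSum_congr
        intro s
        rw [show s ++ [L] ++ [a] = (s ++ [L]) ++ [a] from rfl,
          pvW_append_last (s ++ [L]) a (by simp)]
        simp
        ring
      rw [this, pvSum_add, pvSum_mul]
    have hGsplit : pvG (t ++ [L]) = pvG t + pvC t L := by
      unfold pvG pvC
      rw [pvSum_concat, pvSum_add]
      ring
    have ihA := ih a
    have ihL := ih L
    rw [hCsplit, hGsplit, List.dropLast_concat, List.getLastD_concat]
    unfold pvC at *
    linear_combination ihA - ihL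

theorem pvKey (l : List Int) (a : Int) :
    pvC l a = pvC l.dropLast (l.getLastD 0) + pvG l * (a - l.getLastD 0) := pvKeyAux l a

-- modular-arithmetic helpers (Python % with the positive modulus 1e9+7 is emod)
theorem pvModE (x : Int) : PySem.Int.mod x 1000000007 = x % 1000000007 :=
  PySem.Int.mod_eq_emod_of_pos (by norm_num)

theorem pvEmodAdd (x x' y y' : Int) (hx : x % 1000000007 = x' % 1000000007)
    (hy : y % 1000000007 = y' % 1000000007) :
    (x + y) % 1000000007 = (x' + y') % 1000000007 := by
  rw [Int.add_emod, hx, hy, ← Int.add_emod]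

theorem pvEmodMul (c y y' : Int) (hy : y % 1000000007 = y' % 1000000007) :
    (c * y) % 1000000007 = (c * y') % 1000000007 := by
  rw [Int.mul_emod, hy, ← Int.mul_emod]

theorem pvEmodSelf (x : Int) : (x % 1000000007) % 1000000007 = x % 1000000007 :=
  Int.emod_emod_of_dvd x dvd_rfl

-- A's per-value forward fold computes the chain counts mod p (chains classified by END)
theorem pvFwd (zs : List Int) :
    zs.foldl pvStep (1, 0, 0)
      = ((pvC zs.dropLast (zs.getLastD 0)) % 1000000007, (pvG zs) % 1000000007, zs.getLastD 0) := by
  induction zs using List.reverseRecOn with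
  | nil => simp [pvC, pvG, pvSum_nil, pvW]
  | append_singleton l a ih =>
    rw [List.foldl_append, ih, List.foldl_cons, List.foldl_nil]
    have hf : PySem.Int.mod
        ((pvC l.dropLast (l.getLastD 0)) % 1000000007
          + (pvG l) % 1000000007 * (a - l.getLastD 0)) 1000000007
        = (pvC l a) % 1000000007 := by
      rw [pvModE, pvEmodAdd _ (pvC l.dropLast (l.getLastD 0)) _ (pvG l * (a - l.getLastD 0))
        (pvEmodSelf _)
        (by rw [Int.mul_emod, pvEmodSelf, ← Int.mul_emod]),
        pvKey l a]
    have hg : PySem.Int.mod ((pvG l) % 1000000007 + (pvC l a) % 1000000007) 1000000007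
        = (pvG (l ++ [a])) % 1000000007 := by
      rw [pvModE, pvEmodAdd _ (pvG l) _ (pvC l a) (pvEmodSelf _) (pvEmodSelf _)]
      congr 1
      unfold pvG pvC
      rw [pvSum_concat, pvSum_add]
      ring
    show pvStep (_, _, _) a = _
    unfold pvStep
    simp only [hf, hg, List.dropLast_concat, List.getLastD_concat]

-- chains in (z0 :: l) ++ [L] ending at L, classified by START: prepend z0
theorem pvC_cons (z0 : Int) (l : List Int) (L : Int) :
    pvC (z0 :: l) L = pvC l L + (pvH l L - z0 * pvC l L) := by
  unfold pvC pvH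
  rw [pvSum_cons]
  congr 1
  have : pvSum l (fun s => pvW (z0 :: (s ++ [L])))
      = pvSum l (fun s => (s ++ [L]).headD 0 * pvW (s ++ [L]) + (-z0) * pvW (s ++ [L])) := by
    apply pvSum_congr
    intro s
    rw [pvW_cons z0 (s ++ [L]) (by simp)]
    ring
  rw [show (fun s => pvW ((z0 :: s) ++ [L])) = (fun s => pvW (z0 :: (s ++ [L]))) from rfl, this,
    pvSum_add, pvSum_mul]
  ring

theorem pvH_cons (z0 : Int) (l : List Int) (L : Int) :
    pvH (z0 :: l) L = pvH l L + z0 * (pvH l L - z0 * pvC l L) := by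
  unfold pvH pvC
  rw [pvSum_cons]
  congr 1
  have : pvSum l (fun s => ((z0 :: s) ++ [L]).headD 0 * pvW ((z0 :: s) ++ [L]))
      = pvSum l (fun s => z0 * ((s ++ [L]).headD 0 * pvW (s ++ [L]) + (-z0) * pvW (s ++ [L]))) := by
    apply pvSum_congr
    intro s
    show z0 * pvW (z0 :: (s ++ [L])) = _
    rw [pvW_cons z0 (s ++ [L]) (by simp)]
    ring
  rw [this, pvSum_mul, pvSum_add, pvSum_mul]
  ring

theorem pvG_cons (z0 : Int) (l : List Int) :
    pvG (z0 :: l) = pvG l + (1 + pvHA l - z0 * pvG l) := by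
  unfold pvG pvHA
  rw [pvSum_cons]
  have : pvSum l (fun s => pvW (z0 :: s))
      = pvSum l (fun s => (s.headD 0 * pvW s + (-z0) * pvW s)
          + (1 + z0) * (if s = [] then (1:Int) else 0)) := by
    apply pvSum_congr
    intro s
    rw [pvW_cons_full]
    rcases eq_or_ne s ([] : List Int) with h | h
    · subst h
      rw [if_pos rfl, if_pos rfl]
      simp only [pvW, List.headD_nil]
      ring
    · rw [if_neg h, if_neg h]
      ring
  rw [this, pvSum_add, pvSum_add, pvSum_mul, pvSum_mul, pvSum_ind_nil]
  ring

theorem pvHA_cons (z0 : Int) (l : List Int) :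
    pvHA (z0 :: l) = pvHA l + z0 * (1 + pvHA l - z0 * pvG l) := by
  unfold pvHA pvG
  rw [pvSum_cons]
  have : pvSum l (fun s => (z0 :: s).headD 0 * pvW (z0 :: s))
      = pvSum l (fun s => z0 * ((s.headD 0 * pvW s + (-z0) * pvW s)
          + (1 + z0) * (if s = [] then (1:Int) else 0))) := by
    apply pvSum_congr
    intro s
    show z0 * pvW (z0 :: s) = _
    rw [pvW_cons_full]
    rcases eq_or_ne s ([] : List Int) with h | h
    · subst h
      rw [if_pos rfl, if_pos rfl]
      simp only [pvW, List.headD_nil]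
      ring
    · rw [if_neg h, if_neg h]
      ring
  rw [this, pvSum_mul, pvSum_add, pvSum_add, pvSum_mul, pvSum_mul, pvSum_ind_nil]
  ring

-- B's endsum backward fold computes the same chains mod p (classified by START)
theorem pvBwdE (l : List Int) (L : Int) :
    (l.foldr (fun z st => pvBStep st z) (1, L)).1 = (pvC l L) % 1000000007 ∧
    (l.foldr (fun z st => pvBStep st z) (1, L)).2 % 1000000007 = (pvH l L) % 1000000007 := by
  induction l with
  | nil =>
    constructor
    · simp [pvC, pvSum_nil, pvW]
    · simp [pvH, pvSum_nil, pvW]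
  | cons z0 t ih =>
    obtain ⟨ihS, ihT⟩ := ih
    simp only [List.foldr_cons]
    set st := t.foldr (fun z st => pvBStep st z) (1, L) with hst
    have hR : PySem.Int.mod (st.2 - z0 * st.1) 1000000007
        = (pvH t L - z0 * pvC t L) % 1000000007 := by
      rw [pvModE, Int.sub_emod, ihT, pvEmodMul _ _ (pvC t L) (by rw [ihS, pvEmodSelf]),
        ← Int.sub_emod]
    constructor
    · show PySem.Int.mod (st.1 + _) 1000000007 = _
      rw [hR, pvModE, pvEmodAdd _ (pvC t L) _ (pvH t L - z0 * pvC t L) (by rw [ihS, pvEmodSelf])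
        (pvEmodSelf _), pvC_cons]
    · show PySem.Int.mod (st.2 + z0 * _) 1000000007 % 1000000007 = _
      rw [hR, pvModE, pvEmodSelf,
        pvEmodAdd _ (pvH t L) _ (z0 * (pvH t L - z0 * pvC t L)) ihT
          (by rw [Int.mul_emod, pvEmodSelf, ← Int.mul_emod]),
        pvH_cons]

-- B's allsum backward fold computes all chains mod p (classified by START)
theorem pvBwdA (l : List Int) :
    (l.foldr (fun z st => pvBStep1 st z) (0, 0)).1 = (pvG l) % 1000000007 ∧
    (l.foldr (fun z st => pvBStep1 st z) (0, 0)).2 % 1000000007 = (pvHA l) % 1000000007 := by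
  induction l with
  | nil =>
    constructor
    · simp [pvG, pvSum_nil, pvW]
    · simp [pvHA, pvSum_nil, pvW]
  | cons z0 t ih =>
    obtain ⟨ihS, ihT⟩ := ih
    simp only [List.foldr_cons]
    set st := t.foldr (fun z st => pvBStep1 st z) (0, 0) with hst
    have hR : PySem.Int.mod (1 + st.2 - z0 * st.1) 1000000007
        = (1 + pvHA t - z0 * pvG t) % 1000000007 := by
      rw [pvModE, Int.sub_emod, pvEmodAdd _ 1 _ (pvHA t) (by norm_num) ihT,
        pvEmodMul _ _ (pvG t) (by rw [ihS, pvEmodSelf]), ← Int.sub_emod]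
    constructor
    · show PySem.Int.mod (st.1 + _) 1000000007 = _
      rw [hR, pvModE, pvEmodAdd _ (pvG t) _ (1 + pvHA t - z0 * pvG t) (by rw [ihS, pvEmodSelf])
        (pvEmodSelf _), pvG_cons]
    · show PySem.Int.mod (st.2 + z0 * _) 1000000007 % 1000000007 = _
      rw [hR, pvModE, pvEmodSelf,
        pvEmodAdd _ (pvHA t) _ (z0 * (1 + pvHA t - z0 * pvG t)) ihT
          (by rw [Int.mul_emod, pvEmodSelf, ← Int.mul_emod]),
        pvHA_cons]

-- the bridge: B's endsum/allsum equal the components of A's per-value forward fold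
theorem pvEndsum_eq_fwd (zs : List Int) (h : zs ≠ []) :
    pvEndsum zs = (zs.foldl pvStep (1, 0, 0)).1 := by
  unfold pvEndsum
  rw [PySem.List.slice_to_neg_one, PySem.List.pyGet?_neg_one, List.foldl_reverse]
  rw [List.getLast?_eq_getLast h]
  simp only [Option.getD_some]
  rw [(pvBwdE zs.dropLast (zs.getLast h)).1, pvFwd]
  have : zs.getLast h = zs.getLastD 0 := by
    simp [List.getLastD_eq_getLast?, List.getLast?_eq_getLast h]
  rw [this]

theorem pvAllsum_eq_fwd (zs : List Int) :
    pvAllsum zs = (zs.foldl pvStep (1, 0, 0)).2.1 := by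
  unfold pvAllsum
  rw [List.foldl_reverse, (pvBwdA zs).1, pvFwd]

-- ---- shared infrastructure: prefix xors, A's interleaved loop, B's bucketing loop ----

theorem pvPx_length (x : Int) (l : List Int) : (pvPx x l).length = l.length := by
  induction l generalizing x with
  | nil => rfl
  | cons a t ih => simp [pvPx, ih]

theorem pvPx_append (x : Int) (l : List Int) (a : Int) :
    pvPx x (l ++ [a]) = pvPx x l ++ [PySem.Int.bxor ((pvPx x l).getLastD x) a] := by
  induction l generalizing x with
  | nil => rfl
  | cons b t ih =>
    simp only [List.cons_append, pvPx, ih, List.cons.injEq, true_and]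
    cases pvPx (PySem.Int.bxor x b) t with
    | nil => rfl
    | cons h tl => simp only [List.getLastD_cons]

theorem pvPx_nonneg (x : Int) (l : List Int) (hx : 0 ≤ x) (h : ∀ a ∈ l, 0 ≤ a) :
    ∀ y ∈ pvPx x l, 0 ≤ y := by
  induction l generalizing x with
  | nil => simp [pvPx]
  | cons a t ih =>
    have hy : 0 ≤ PySem.Int.bxor x a := by
      rw [PySem.Int.bxor_of_nonneg hx (h a (by simp))]
      positivity
    intro y hy'
    rcases List.mem_cons.mp hy' with rfl | hmem
    · exact hy
    · exact ih _ hy (fun b hb => h b (by simp [hb])) y hmem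

theorem pxA (N : Int) (A : List Int) (h1 : 1 ≤ N) (h2 : N ≤ (A.length : Int)) :
    ((PySem.List.pyRange 1 N 1).foldl
      (fun b n => PySem.List.pySetD b n
        (PySem.Int.bxor (PySem.List.pyGetD A n 0) (PySem.List.pyGetD b (n - 1) 0)))
      (PySem.List.pySetD (List.replicate N.toNat 0) 0 (PySem.List.pyGetD A 0 0)))
    = pvPx 0 (A.take N.toNat) := by
  have hA0 : PySem.List.pyGetD A 0 0 = A.getD 0 0 := by
    rw [PySem.List.pyGetD_eq_getElem _ 0 le_rfl (by omega)]
    have : A ≠ [] := by intro h; subst h; simp at h2; omega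
    cases A with
    | nil => simp at this
    | cons a t => simp
  have key : ∀ (k : Int), 1 ≤ k → k ≤ N →
      ((PySem.List.pyRange 1 k 1).foldl
        (fun b n => PySem.List.pySetD b n
          (PySem.Int.bxor (PySem.List.pyGetD A n 0) (PySem.List.pyGetD b (n - 1) 0)))
        (PySem.List.pySetD (List.replicate N.toNat 0) 0 (PySem.List.pyGetD A 0 0)))
      = pvPx 0 (A.take k.toNat) ++ List.replicate (N.toNat - k.toNat) 0 := by
    intro k hk1
    induction k, hk1 using Int.le_induction with
    | base =>
      intro _
      rw [PySem.List.pyRange_one_eq_nil le_rfl, List.foldl_nil]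
      rw [PySem.List.pySetD_of_nonneg _ _ le_rfl, hA0]
      cases A with
      | nil => simp at h2; omega
      | cons a t =>
        have hN : N.toNat = (N.toNat - 1) + 1 := by omega
        rw [hN, List.replicate_succ]
        simp only [Int.toNat_zero, Int.toNat_one, List.set_cons_zero]
        simp [pvPx, PySem.Int.bxor_comm]
    | succ k hk ihk =>
      intro hkN
      have hkN' : k ≤ N := by omega
      have ih := ihk hkN'
      rw [show k + 1 = k + 1 from rfl, PySem.List.pyRange_one_succ_right (by omega : (1:Int) ≤ k),
        List.foldl_append, ih, List.foldl_cons, List.foldl_nil]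
      -- the updated cell
      have hPlen : (pvPx 0 (A.take k.toNat)).length = k.toNat := by
        rw [pvPx_length]; simp [List.length_take]; omega
      have hRne : N.toNat - k.toNat = (N.toNat - (k + 1).toNat) + 1 := by omega
      have hAk : PySem.List.pyGetD A k 0 = A.getD k.toNat 0 := by
        rw [PySem.List.pyGetD_eq_getElem _ 0 (by omega) (by omega)]
        rw [List.getD_eq_getElem _ _ (by omega)]
      have hprev : PySem.List.pyGetD
            (pvPx 0 (A.take k.toNat) ++ List.replicate (N.toNat - k.toNat) 0) (k - 1) 0
          = (pvPx 0 (A.take k.toNat)).getLastD 0 := by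
        rw [PySem.List.pyGetD_eq_getElem _ 0 (by omega) (by simp [hPlen]; omega)]
        rw [List.getElem_append_left (by omega : (k-1).toNat < (pvPx 0 (A.take k.toNat)).length)]
        have hne : pvPx 0 (A.take k.toNat) ≠ [] := by
          intro h; have := congrArg List.length h; simp [hPlen] at this; omega
        rw [List.getLastD_eq_getLast?, List.getLast?_eq_getElem?,
          List.getElem?_eq_getElem (by omega : (pvPx 0 (A.take k.toNat)).length - 1
            < (pvPx 0 (A.take k.toNat)).length)]
        simp only [Option.getD_some]
        congr 1; omega
      rw [hprev, hAk]
      rw [PySem.List.pySetD_of_nonneg _ _ (by omega)]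
      rw [hRne, List.replicate_succ]
      rw [List.set_append_right _ _ (by omega), hPlen]
      have : k.toNat - k.toNat = 0 := by omega
      rw [this, List.set_cons_zero]
      have htake : A.take (k + 1).toNat = A.take k.toNat ++ [A.getD k.toNat 0] := by
        have h1' : (k+1).toNat = k.toNat + 1 := by omega
        rw [h1', List.take_add_one]
        congr 1
        rw [List.getD_eq_getElem _ _ (by omega)]
        simp [List.getElem?_eq_getElem (by omega : k.toNat < A.length)]
      rw [htake, pvPx_append]
      rw [PySem.Int.bxor_comm]
      simp
  have := key N h1 le_rfl
  simpa using this

theorem pyGetD_pySetD (l : List Int) (i j v : Int) (hi : 0 ≤ i) (_hil : i < l.length)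
    (hj : 0 ≤ j) (hjl : j < l.length) :
    PySem.List.pyGetD (PySem.List.pySetD l i v) j 0 = if j = i then v else PySem.List.pyGetD l j 0 := by
  rw [PySem.List.pySetD_of_nonneg l v hi,
    PySem.List.pyGetD_eq_getElem _ 0 hj (by simpa using hjl),
    PySem.List.pyGetD_eq_getElem _ 0 hj hjl]
  rw [List.getElem_set]
  have : i.toNat = j.toNat ↔ j = i := by omega
  split_ifs with hij hji hji
  · rfl
  · omega
  · omega
  · rfl

theorem pyGetD_replicate (n : Nat) (c : Int) (i : Int) (h0 : 0 ≤ i) (h : i < (n : Int)) :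
    PySem.List.pyGetD (List.replicate n c) i 0 = c := by
  rw [PySem.List.pyGetD_eq_getElem _ 0 h0 (by simpa using h)]
  simp

theorem loopA (L : Nat) (bs : List Int) (dp0 dp1 cnt : List Int) (z : Int)
    (hl0 : dp0.length = L) (hl1 : dp1.length = L) (hl2 : cnt.length = L)
    (hbs : ∀ v ∈ bs, 0 ≤ v ∧ v < (L : Int)) :
    (bs.foldl pvStepA (dp0, dp1, cnt, z)).2.2.2 = z + (bs.count 0 : Int) ∧
    ∀ v : Int, 0 ≤ v → v < (L : Int) →
      (PySem.List.pyGetD (bs.foldl pvStepA (dp0, dp1, cnt, z)).1 v 0,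
       PySem.List.pyGetD (bs.foldl pvStepA (dp0, dp1, cnt, z)).2.1 v 0,
       PySem.List.pyGetD (bs.foldl pvStepA (dp0, dp1, cnt, z)).2.2.1 v 0)
        = (pvZL z bs v).foldl pvStep
            (PySem.List.pyGetD dp0 v 0, PySem.List.pyGetD dp1 v 0, PySem.List.pyGetD cnt v 0) := by
  induction bs generalizing dp0 dp1 cnt z with
  | nil =>
    refine ⟨by simp, fun v _ _ => ?_⟩
    simp [pvZL, pvZP]
  | cons v0 t ih =>
    obtain ⟨hv0, hv0L⟩ := hbs v0 (by simp)
    have hbs' : ∀ v ∈ t, 0 ≤ v ∧ v < (L : Int) := fun v hv => hbs v (by simp [hv])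
    -- the one-step state
    set z' := if v0 = 0 then z + 1 else z with hz'
    set fv := PySem.Int.mod
      (PySem.List.pyGetD dp0 v0 0 + PySem.List.pyGetD dp1 v0 0 * (z' - PySem.List.pyGetD cnt v0 0)) 1000000007 with hfv
    set gv := PySem.Int.mod (PySem.List.pyGetD dp1 v0 0 + fv) 1000000007 with hgv
    have hstep : pvStepA (dp0, dp1, cnt, z) v0
        = (PySem.List.pySetD dp0 v0 fv, PySem.List.pySetD dp1 v0 gv, PySem.List.pySetD cnt v0 z', z') := rfl
    have hL0 : (PySem.List.pySetD dp0 v0 fv).length = L := by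
      rw [PySem.List.pySetD_of_nonneg _ _ hv0]; simp [hl0]
    have hL1 : (PySem.List.pySetD dp1 v0 gv).length = L := by
      rw [PySem.List.pySetD_of_nonneg _ _ hv0]; simp [hl1]
    have hL2 : (PySem.List.pySetD cnt v0 z').length = L := by
      rw [PySem.List.pySetD_of_nonneg _ _ hv0]; simp [hl2]
    obtain ⟨ihz, ihv⟩ := ih (PySem.List.pySetD dp0 v0 fv) (PySem.List.pySetD dp1 v0 gv)
      (PySem.List.pySetD cnt v0 z') z' hL0 hL1 hL2 hbs'
    simp only [List.foldl_cons, hstep]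
    constructor
    · rw [ihz, List.count_cons]
      rcases eq_or_ne v0 0 with h | h
      · simp only [h, beq_self_eq_true, if_true, hz']
        push_cast; ring
      · simp only [hz', beq_iff_eq, h, if_false]
        push_cast; ring
    · intro v hv hvL
      rw [ihv v hv hvL]
      have hzl : pvZL z (v0 :: t) v
          = if v0 = v then z' :: pvZL z' t v else pvZL z' t v := by
        simp only [pvZL, pvZP, List.filter_cons]
        rcases eq_or_ne v0 v with h | h
        · simp [h, hz']
        · simp [h, hz']
      rcases eq_or_ne v v0 with hvv | hvv
      · subst hvv
        rw [hzl, if_pos rfl, List.foldl_cons]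
        have e0 := pyGetD_pySetD dp0 v v fv hv0 (by omega) hv (by omega)
        have e1 := pyGetD_pySetD dp1 v v gv hv0 (by omega) hv (by omega)
        have e2 := pyGetD_pySetD cnt v v z' hv0 (by omega) hv (by omega)
        rw [e0, e1, e2, if_pos rfl, if_pos rfl, if_pos rfl]
        rfl
      · rw [hzl, if_neg (Ne.symm hvv)]
        have e0 := pyGetD_pySetD dp0 v0 v fv hv0 (by omega) hv (by omega)
        have e1 := pyGetD_pySetD dp1 v0 v gv hv0 (by omega) hv (by omega)
        have e2 := pyGetD_pySetD cnt v0 v z' hv0 (by omega) hv (by omega)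
        rw [e0, e1, e2, if_neg hvv, if_neg hvv, if_neg hvv]

theorem loopB (as : List Int) (x z : Int) (d : PySem.Dict Int (List Int)) :
    as.foldl pvStepB (x, z, d)
      = ((pvPx x as).getLastD x, z + ((pvPx x as).count 0 : Int), pvGrp d (pvZP z (pvPx x as))) := by
  induction as generalizing x z d with
  | nil => simp [pvPx, pvZP, pvGrp]
  | cons a t ih =>
    simp only [List.foldl_cons, pvPx, pvZP]
    rw [show pvStepB (x, z, d) a
        = (PySem.Int.bxor x a, (if PySem.Int.bxor x a = 0 then z + 1 else z),
           d.modify (PySem.Int.bxor x a) [] (· ++ [if PySem.Int.bxor x a = 0 then z + 1 else z]))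
      from rfl]
    rw [ih]
    simp only [List.getLastD_cons, List.count_cons, pvGrp, List.foldl_cons, Prod.mk.injEq]
    refine ⟨trivial, ?_, trivial⟩
    rcases eq_or_ne (PySem.Int.bxor x a) 0 with h | h
    · simp only [h, beq_self_eq_true, if_true]
      push_cast; omega
    · simp only [h, beq_iff_eq, if_false]
      push_cast; omega

theorem map_fst_pvZP (z : Int) (bs : List Int) : (pvZP z bs).map (·.1) = bs := by
  induction bs generalizing z with
  | nil => rfl
  | cons v t ih => simp [pvZP, ih]

theorem grp_getD (l : List (Int × Int)) (v : Int) :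
    (pvGrp PySem.Dict.empty l).getD v [] = (l.filter (fun p => p.1 == v)).map (·.2) := by
  unfold pvGrp
  rw [PySem.Dict.getD_foldl_modify_append]
  simp

theorem grp_keys (l : List (Int × Int)) :
    (pvGrp PySem.Dict.empty l).keys = PySem.Set.ofList (l.map (·.1)) := by
  unfold pvGrp
  rw [PySem.Dict.keys_foldl_modify_key]
  simp [PySem.Set.update, PySem.Set.ofList_eq_foldl]

theorem grp_nodup (l : List (Int × Int)) : (pvGrp PySem.Dict.empty l).keys.Nodup := by
  unfold pvGrp
  exact PySem.Dict.nodup_keys_foldl_modify_key l (·.1) [] (fun _ p => (· ++ [p.2])) _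
    PySem.Dict.nodup_keys_empty

theorem foldl_mod_sum {α : Type} (f : α → Int) (l : List α) (a0 : Int)
    (h0 : 0 ≤ a0) (h1 : a0 < 1000000007) :
    l.foldl (fun a x => PySem.Int.mod (a + f x) 1000000007) a0
      = PySem.Int.mod (a0 + (l.map f).sum) 1000000007 := by
  have hM : (0:Int) < 1000000007 := by norm_num
  induction l generalizing a0 with
  | nil =>
    simp only [List.foldl_nil, List.map_nil, List.sum_nil, add_zero]
    rw [PySem.Int.mod_eq_emod_of_pos hM, Int.emod_eq_of_lt h0 h1]
  | cons x t ih =>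
    simp only [List.foldl_cons, List.map_cons, List.sum_cons]
    rw [ih _ (PySem.Int.mod_nonneg _ hM) (PySem.Int.mod_lt _ hM)]
    rw [PySem.Int.mod_eq_emod_of_pos hM, PySem.Int.mod_eq_emod_of_pos hM,
      PySem.Int.mod_eq_emod_of_pos hM]
    rw [Int.add_emod ((a0 + f x) % 1000000007), Int.emod_emod_of_dvd _ dvd_rfl,
      ← Int.add_emod, ← add_assoc]

theorem foldl_mod_sum_if {α : Type} (P : α → Prop) [DecidablePred P] (f : α → Int) (l : List α)
    (a0 : Int) (h0 : 0 ≤ a0) (h1 : a0 < 1000000007) :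
    l.foldl (fun a x => if P x then PySem.Int.mod (a + f x) 1000000007 else a) a0
      = PySem.Int.mod (a0 + ((l.filter (fun x => decide (P x))).map f).sum) 1000000007 := by
  have hM : (0:Int) < 1000000007 := by norm_num
  induction l generalizing a0 with
  | nil =>
    simp only [List.foldl_nil, List.filter_nil, List.map_nil, List.sum_nil, add_zero]
    rw [PySem.Int.mod_eq_emod_of_pos hM, Int.emod_eq_of_lt h0 h1]
  | cons x t ih =>
    simp only [List.foldl_cons, List.filter_cons]
    by_cases hx : P x
    · simp only [hx, if_true, decide_true, List.map_cons, List.sum_cons]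
      rw [ih _ (PySem.Int.mod_nonneg _ hM) (PySem.Int.mod_lt _ hM)]
      rw [PySem.Int.mod_eq_emod_of_pos hM, PySem.Int.mod_eq_emod_of_pos hM,
        PySem.Int.mod_eq_emod_of_pos hM]
      rw [Int.add_emod ((a0 + f x) % 1000000007), Int.emod_emod_of_dvd _ dvd_rfl,
        ← Int.add_emod, ← add_assoc]
    · simp only [hx, if_false, decide_false]
      exact ih a0 h0 h1

theorem sum_map_filter_of_zero {α : Type} (P : α → Prop) [DecidablePred P] (f : α → Int)
    (l : List α) (h : ∀ x ∈ l, ¬ P x → f x = 0) :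
    ((l.filter (fun x => decide (P x))).map f).sum = (l.map f).sum := by
  induction l with
  | nil => rfl
  | cons x t ih =>
    have ih' := ih (fun y hy => h y (List.mem_cons_of_mem _ hy))
    by_cases hx : P x
    · simp [hx, ih']
    · simp [hx, ih', h x (by simp) hx]

theorem pvZL_nil_of_not_mem (z : Int) (bs : List Int) (v : Int) (h : v ∉ bs) :
    pvZL z bs v = [] := by
  have : (pvZP z bs).filter (fun p => p.1 == v) = [] := by
    rw [List.filter_eq_nil_iff]
    intro p hp
    have : p.1 ∈ bs := by
      rw [← map_fst_pvZP z bs]; exact List.mem_map_of_mem hp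
    simp only [beq_iff_eq]
    intro he; exact h (he ▸ this)
  simp [pvZL, this]

theorem pvZL_ne_nil_of_mem (z : Int) (bs : List Int) (v : Int) (h : v ∈ bs) :
    pvZL z bs v ≠ [] := by
  have : v ∈ (pvZP z bs).map (·.1) := by rw [map_fst_pvZP]; exact h
  obtain ⟨p, hp, hpv⟩ := List.mem_map.mp this
  intro hnil
  unfold pvZL at hnil
  rw [List.map_eq_nil_iff, List.filter_eq_nil_iff] at hnil
  exact hnil p hp (by simp [hpv])

theorem pvZL_length (z : Int) (bs : List Int) (v : Int) :
    (pvZL z bs v).length = bs.count v := by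
  unfold pvZL
  rw [List.length_map, ← List.countP_eq_length_filter]
  have h1 : List.countP (· == v) ((pvZP z bs).map (·.1))
      = List.countP ((· == v) ∘ (·.1)) (pvZP z bs) := List.countP_map
  rw [map_fst_pvZP] at h1
  exact h1.symm

theorem getLastD_mem : ∀ (l : List Int) (d : Int), l ≠ [] → l.getLastD d ∈ l := by
  intro l
  induction l with
  | nil => simp
  | cons a t ih =>
    intro d _
    rw [List.getLastD_cons]
    cases t with
    | nil => simp
    | cons b t' => exact List.mem_cons_of_mem _ (ih a (by simp))

theorem core_eq (bs : List Int) (hne : bs ≠ []) (hnn : ∀ v ∈ bs, 0 ≤ v) :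
    pvAcore bs = pvBcore bs := by
  have hM : (0:Int) < 1000000007 := by norm_num
  rcases e : PySem.List.max? bs (fun x => x) with _ | m
  · rw [PySem.List.max?_eq_none_iff] at e; exact absurd e hne
  have hub : ∀ y ∈ bs, y ≤ m := PySem.List.max?_isMax e
  have hm0 : 0 ≤ m := hnn m (PySem.List.max?_mem e)
  have hbsL : ∀ v ∈ bs, 0 ≤ v ∧ v < (((m + 1).toNat : Nat) : Int) :=
    fun v hv => ⟨hnn v hv, by have := hub v hv; omega⟩
  obtain ⟨hz, hch⟩ := loopA (m + 1).toNat bs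
    (List.replicate (m + 1).toNat 1) (List.replicate (m + 1).toNat 0) (List.replicate (m + 1).toNat 0) 0
    (by simp) (by simp) (by simp) hbsL
  have hlastmem : bs.getLastD 0 ∈ bs := getLastD_mem bs 0 hne
  have hGD : ∀ k : Int,
      (pvGrp PySem.Dict.empty (pvZP 0 bs)).getD k [] = pvZL 0 bs k := by
    intro k; rw [grp_getD]; rfl
  have hkeys : ∀ k : Int, k ∈ (pvGrp PySem.Dict.empty (pvZP 0 bs)).keys ↔ k ∈ bs := by
    intro k
    rw [grp_keys, map_fst_pvZP, PySem.Set.mem_ofList]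
  unfold pvAcore pvBcore
  simp only []
  rw [e]
  simp only [Option.getD_some]
  split_ifs with hl
  · -- total prefix xor ≠ 0
    have h0 : 0 ≤ bs.getLastD 0 := hnn _ hlastmem
    have hL : bs.getLastD 0 < (((m + 1).toNat : Nat) : Int) := by
      have := hub _ hlastmem; omega
    have h3 := hch (bs.getLastD 0) h0 hL
    rw [pyGetD_replicate (m + 1).toNat 1 _ h0 hL,
      pyGetD_replicate (m + 1).toNat 0 _ h0 hL] at h3
    rw [hGD, pvEndsum_eq_fwd _ (pvZL_ne_nil_of_mem 0 bs _ hlastmem)]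
    exact congrArg Prod.fst h3
  · -- total prefix xor = 0
    rw [hz]
    simp only [zero_add]
    have hzeros : (((pvGrp PySem.Dict.empty (pvZP 0 bs)).getD 0 []).length : Int)
        = ((bs.count 0 : Nat) : Int) := by
      rw [hGD 0, pvZL_length]
    rw [hzeros]
    -- closed forms of the two accumulation loops
    have ha0nn : 0 ≤ PySem.Int.powMod 2 ((bs.count 0 : Int) - 1).toNat 1000000007 :=
      PySem.Int.mod_nonneg _ hM
    have ha0lt : PySem.Int.powMod 2 ((bs.count 0 : Int) - 1).toNat 1000000007 < 1000000007 :=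
      PySem.Int.mod_lt _ hM
    rw [foldl_mod_sum (fun i => PySem.List.pyGetD
        (bs.foldl pvStepA (List.replicate (m + 1).toNat 1, List.replicate (m + 1).toNat 0,
          List.replicate (m + 1).toNat 0, 0)).2.1 i 0)
      (PySem.List.pyRange 1 (m + 1) 1) _ ha0nn ha0lt]
    have hitems : (pvGrp PySem.Dict.empty (pvZP 0 bs)).items.foldl
        (fun ans p => if p.1 ≠ 0 then PySem.Int.mod (ans + pvAllsum p.2) 1000000007 else ans)
        (PySem.Int.powMod 2 ((bs.count 0 : Int) - 1).toNat 1000000007)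
      = (pvGrp PySem.Dict.empty (pvZP 0 bs)).keys.foldl
        (fun ans k => if k ≠ 0 then PySem.Int.mod
            (ans + pvAllsum ((pvGrp PySem.Dict.empty (pvZP 0 bs)).getD k [])) 1000000007
          else ans)
        (PySem.Int.powMod 2 ((bs.count 0 : Int) - 1).toNat 1000000007) := by
      rw [PySem.Dict.items_eq_map_keys _ (grp_nodup _) [], List.foldl_map]
    rw [hitems]
    refine Eq.trans ?_ (foldl_mod_sum_if (fun k : Int => k ≠ 0)
      (fun k => pvAllsum ((pvGrp PySem.Dict.empty (pvZP 0 bs)).getD k []))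
      ((pvGrp PySem.Dict.empty (pvZP 0 bs)).keys)
      (PySem.Int.powMod 2 ((bs.count 0 : Int) - 1).toNat 1000000007) ha0nn ha0lt).symm
    congr 1
    congr 1
    -- both sums are the sum of G over the distinct nonzero prefix-xor values
    have hGmapA : (PySem.List.pyRange 1 (m + 1) 1).map (fun i => PySem.List.pyGetD
        (bs.foldl pvStepA (List.replicate (m + 1).toNat 1, List.replicate (m + 1).toNat 0,
          List.replicate (m + 1).toNat 0, 0)).2.1 i 0)
        = (PySem.List.pyRange 1 (m + 1) 1).map
            (fun i => ((pvZL 0 bs i).foldl pvStep (1, 0, 0)).2.1) := by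
      apply List.map_congr_left
      intro i hi
      rw [PySem.List.mem_pyRange_one] at hi
      have h0i : 0 ≤ i := by omega
      have hLi : i < (((m + 1).toNat : Nat) : Int) := by omega
      have h3 := hch i h0i hLi
      rw [pyGetD_replicate (m + 1).toNat 1 _ h0i hLi,
        pyGetD_replicate (m + 1).toNat 0 _ h0i hLi] at h3
      have := congrArg (fun t => t.2.1) h3
      simpa using this
    have hGmapB : (((pvGrp PySem.Dict.empty (pvZP 0 bs)).keys.filter
          (fun x => decide (x ≠ 0))).map
        (fun k => pvAllsum ((pvGrp PySem.Dict.empty (pvZP 0 bs)).getD k [])))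
        = (((pvGrp PySem.Dict.empty (pvZP 0 bs)).keys.filter
          (fun x => decide (x ≠ 0))).map
        (fun k => ((pvZL 0 bs k).foldl pvStep (1, 0, 0)).2.1)) := by
      apply List.map_congr_left
      intro k _
      rw [hGD, pvAllsum_eq_fwd]
    rw [hGmapA, hGmapB]
    -- restrict the range sum to values that occur
    rw [← sum_map_filter_of_zero (fun i => i ∈ bs)
      (fun i => ((pvZL 0 bs i).foldl pvStep (1, 0, 0)).2.1)
      (PySem.List.pyRange 1 (m + 1) 1)
      (fun i _ hni => by
        show (List.foldl pvStep (1, 0, 0) (pvZL 0 bs i)).2.1 = 0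
        rw [pvZL_nil_of_not_mem 0 bs i hni]
        rfl)]
    -- the two index lists are permutations: sum via Finset
    have hnd1 : ((PySem.List.pyRange 1 (m + 1) 1).filter (fun x => decide (x ∈ bs))).Nodup :=
      (PySem.List.nodup_pyRange_one 1 (m + 1)).filter _
    have hnd2 : ((pvGrp PySem.Dict.empty (pvZP 0 bs)).keys.filter (fun x => decide (x ≠ 0))).Nodup :=
      (grp_nodup _).filter _
    rw [← List.sum_toFinset _ hnd1, ← List.sum_toFinset _ hnd2]
    congr 1
    ext x
    simp only [List.mem_toFinset, List.mem_filter, PySem.List.mem_pyRange_one, decide_eq_true_eq,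
      hkeys x]
    constructor
    · rintro ⟨⟨hx1, _⟩, hxb⟩
      exact ⟨hxb, by omega⟩
    · rintro ⟨hxb, hx0⟩
      have := hnn x hxb
      have := hub x hxb
      exact ⟨⟨by omega, by omega⟩, hxb⟩

theorem A_char (N : Int) (A : List Int) (h1 : 1 ≤ N) (h2 : N ≤ (A.length : Int)) :
    count_equal_beauty_partitions N A = pvAcore (pvPx 0 (A.take N.toNat)) := by
  have hTlen : (A.take N.toNat).length = N.toNat := by
    simp [List.length_take]; omega
  have hlen : (pvPx 0 (A.take N.toNat)).length = N.toNat := by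
    rw [pvPx_length, hTlen]
  unfold count_equal_beauty_partitions pvAcore
  simp only []
  rw [pxA N A h1 h2]
  have hlast : PySem.List.pyGetD (pvPx 0 (A.take N.toNat)) (N - 1) 0
      = (pvPx 0 (A.take N.toNat)).getLastD 0 := by
    rw [PySem.List.pyGetD_eq_getElem _ 0 (by omega) (by rw [hlen]; omega)]
    have hne : pvPx 0 (A.take N.toNat) ≠ [] := by
      intro h; have := congrArg List.length h; rw [hlen] at this; simp at this; omega
    rw [List.getLastD_eq_getLast?, List.getLast?_eq_getElem?,
      List.getElem?_eq_getElem (by omega : (pvPx 0 (A.take N.toNat)).length - 1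
        < (pvPx 0 (A.take N.toNat)).length)]
    simp only [Option.getD_some]
    congr 1; omega
  rw [hlast]
  rw [show PySem.List.pyRange 0 N 1
      = PySem.List.pyRange 0 ((pvPx 0 (A.take N.toNat)).length : Int) 1 from by
    rw [hlen]; congr 1; omega]
  rw [PySem.List.foldl_pyRange_zero_pyGetD' (pvPx 0 (A.take N.toNat)) 0 pvStepA]

theorem B_char (N : Int) (A : List Int) (h1 : 1 ≤ N) (h2 : N ≤ (A.length : Int)) :
    count_equal_beauty_partitions_alt N A = pvBcore (pvPx 0 (A.take N.toNat)) := by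
  have hTlen : (A.take N.toNat).length = N.toNat := by
    simp [List.length_take]; omega
  unfold count_equal_beauty_partitions_alt pvBcore
  simp only []
  rw [PySem.List.foldl_congr_mem _ _
    (fun st n => pvStepB st (PySem.List.pyGetD (A.take N.toNat) n 0)) _
    (fun st n hn => by
      rw [PySem.List.mem_pyRange_one] at hn
      congr 1
      rw [PySem.List.pyGetD_eq_getElem _ 0 (by omega) (by omega),
        PySem.List.pyGetD_eq_getElem _ 0 (by omega) (by rw [hTlen]; omega)]
      rw [List.getElem_take])]
  rw [show PySem.List.pyRange 0 N 1
      = PySem.List.pyRange 0 ((A.take N.toNat).length : Int) 1 from by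
    rw [hTlen]; congr 1; omega]
  rw [PySem.List.foldl_pyRange_zero_pyGetD' (A.take N.toNat) 0 pvStepB]
  rw [loopB]

-- ===== VERDICT (by name: the statement is the Claim_ definition above) =====
theorem count_equal_beauty_partitions_spec : Claim_equal_count_equal_beauty_partitions := by
  intro N A _ hpre
  obtain ⟨h1, h2, h3⟩ := hpre
  have hTlen : (A.take N.toNat).length = N.toNat := by
    simp [List.length_take]; omega
  have hne : pvPx 0 (A.take N.toNat) ≠ [] := by
    intro h; have := congrArg List.length h; simp [pvPx_length, hTlen] at this; omega
  unfold Spec_count_equal_beauty_partitions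
  rw [A_char N A h1 h2, B_char N A h1 h2]
  exact core_eq _ hne (pvPx_nonneg 0 _ le_rfl h3)
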